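-- pv_equiv track=rewrite | github.com/heidijiang/ID3 | ID3/ID3.py | check_homogenous
-- ===== SOURCE A (Python) =====
-- def check_homogenous(data_set):
--     '''
--     ========================================================================================================
--     Input:  A data_set
--     ========================================================================================================
--     Job:    Checks if the output value (index 0) is the same for all examples in the the data_set, if so return that output value, otherwise return None.
--     ========================================================================================================
--     Output: Return either the homogenous attribute or None
--     ========================================================================================================
--      '''
--     # Your code here
--     homogenous = 0
--     for i in data_set:
--         if i['Class'] != data_set[0]['Class']:
--             homogenous = None
--             break
--
--     if homogenous == 0:
--         homogenous = data_set[0]['Class']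
--     return homogenous
-- ===== SOURCE B (Python) =====
-- def check_homogenous(data_set):
--     first = data_set[0]['Class']
--     classes = {row['Class'] for row in data_set}
--     return first if len(classes) == 1 else None
-- ===== Notes on version B (the rewrite author's own statement) =====
-- stated objective: idiomatic
-- what changed: A's sentinel-flag loop with an early break is replaced by building the set of all distinct Class labels in one comprehension and testing its cardinality against 1.
-- outside the precondition, e.g. on check_homogenous([{'Class': 'a'}, {'Class': 'b'}, {'x': 'y'}]): A returns None, B raises KeyError
import Mathlib
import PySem

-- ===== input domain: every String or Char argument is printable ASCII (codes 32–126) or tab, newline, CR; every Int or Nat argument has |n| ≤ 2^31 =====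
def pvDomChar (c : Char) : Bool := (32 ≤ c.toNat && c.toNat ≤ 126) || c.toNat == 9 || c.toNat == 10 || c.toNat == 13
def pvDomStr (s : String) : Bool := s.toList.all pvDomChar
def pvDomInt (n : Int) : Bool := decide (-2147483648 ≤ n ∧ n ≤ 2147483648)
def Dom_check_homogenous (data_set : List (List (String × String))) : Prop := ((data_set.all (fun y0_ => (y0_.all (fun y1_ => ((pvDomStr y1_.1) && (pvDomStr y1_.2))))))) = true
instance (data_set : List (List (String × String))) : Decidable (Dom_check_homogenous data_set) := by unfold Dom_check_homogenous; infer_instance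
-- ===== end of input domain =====

-- B replaces A's sentinel-flag scan (early break on first mismatch) by collecting the set of
-- distinct Class labels and testing its cardinality; same O(n) cost, more idiomatic.


-- ===== PORT A =====
-- i['Class'] on a row (first-match association-list lookup; none = Python KeyError, excluded by Pre_)
def pvClass (r : List (String × String)) : Option String := (PySem.Dict.mk r).get? "Class"

-- A's for-loop: true = the break was never taken (homogenous stayed 0), false = break hit
def pvScanA (first : Option String) : List (List (String × String)) → Bool
  | [] => true
  | r :: rest => if pvClass r ≠ first then false else pvScanA first rest

def check_homogenous (data_set : List (List (String × String))) : Option String :=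
  let first := pvClass (data_set.headD [])   -- data_set[0]['Class'] (empty input excluded by Pre_)
  if pvScanA first data_set then first else none

-- ===== PORT B =====
def check_homogenous_alt (data_set : List (List (String × String))) : Option String :=
  let first := pvClass (data_set.headD [])
  let classes := PySem.Set.ofList (data_set.map pvClass)
  if classes.length = 1 then first else none

-- ===== PRECONDITION & SPEC =====
-- Pre_ excludes the empty data_set (A raises IndexError) and rows without a 'Class' key:
-- there A raises KeyError — except when a label mismatch precedes the missing key, where A
-- still returns None while B's whole-list set comprehension raises KeyError (see cite).
def Pre_check_homogenous (data_set : List (List (String × String))) : Prop :=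
  data_set ≠ [] ∧ ∀ r ∈ data_set, ((PySem.Dict.mk r).contains "Class") = true
instance (data_set : List (List (String × String))) : Decidable (Pre_check_homogenous data_set) := by unfold Pre_check_homogenous; infer_instance
def pvWitness_check_homogenous : (List (List (String × String))) := [[("Class", "a")], [("Class", "a")]]
def Spec_check_homogenous (data_set : List (List (String × String))) (out : Option String) : Prop := out = check_homogenous_alt data_set
instance (data_set : List (List (String × String))) (out : Option String) : Decidable (Spec_check_homogenous data_set out) := by unfold Spec_check_homogenous; infer_instance

-- ===== CLAIM (what is proved, stated in full; the proofs are below) =====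
def Claim_equal_check_homogenous : Prop := ∀ (data_set : List (List (String × String))), Dom_check_homogenous data_set → Pre_check_homogenous data_set → Spec_check_homogenous data_set (check_homogenous data_set)

-- ===== LEMMAS AND PROOFS =====

-- A's scan succeeds iff every row's label equals the first row's label
lemma pvScanA_true_iff (first : Option String) (l : List (List (String × String))) :
    pvScanA first l = true ↔ ∀ x ∈ l.map pvClass, x = first := by
  induction l with
  | nil => simp [pvScanA]
  | cons r rest ih =>
    simp only [pvScanA, List.map_cons, List.mem_cons]
    by_cases h : pvClass r = first
    · simp [h, ih]
    · simp [h]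

-- a nodup list whose elements all equal a, containing a, is [a]
lemma nodup_all_eq_singleton {α : Type} (l : List α) (a : α)
    (hnd : l.Nodup) (hmem : a ∈ l) (hall : ∀ x ∈ l, x = a) : l = [a] := by
  cases l with
  | nil => cases hmem
  | cons x xs =>
    have hx : x = a := hall x (List.mem_cons_self)
    have hxs : xs = [] := by
      cases xs with
      | nil => rfl
      | cons y ys =>
        have hy : y = a := hall y (by simp)
        have : x ∉ (y :: ys) := (List.nodup_cons.mp hnd).1
        exact absurd (by simp [hx, hy]) this
    simp [hx, hxs]

theorem check_homogenous_spec : Claim_equal_check_homogenous := by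
  intro ds _hdom hpre
  unfold Spec_check_homogenous check_homogenous check_homogenous_alt
  obtain ⟨hne, -⟩ := hpre
  obtain ⟨h, t, rfl⟩ := List.exists_cons_of_ne_nil hne
  simp only [List.headD_cons]
  set first := pvClass h with hfirst
  have hmemfirst : first ∈ (h :: t).map pvClass := by simp [hfirst]
  by_cases hscan : pvScanA first (h :: t) = true
  · -- all labels equal first → the set is exactly [first]
    have hall := (pvScanA_true_iff first (h :: t)).mp hscan
    have hall' : ∀ x ∈ PySem.Set.ofList ((h :: t).map pvClass), x = first := by
      intro x hx; exact hall x ((PySem.Set.mem_ofList _ _).mp hx)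
    have hmem' : first ∈ PySem.Set.ofList ((h :: t).map pvClass) :=
      (PySem.Set.mem_ofList _ _).mpr hmemfirst
    have : PySem.Set.ofList ((h :: t).map pvClass) = [first] :=
      nodup_all_eq_singleton _ _ (PySem.Set.nodup_ofList _) hmem' hall'
    simp only [List.map_cons] at this
    simp [hscan, this]
  · -- some label differs from first → the set has two distinct members, length ≠ 1
    have hx : ∃ x ∈ (h :: t).map pvClass, x ≠ first := by
      by_contra hc
      push Not at hc
      exact hscan ((pvScanA_true_iff first (h :: t)).mpr hc)
    obtain ⟨x, hxmem, hxne⟩ := hx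
    have hlen : (PySem.Set.ofList ((h :: t).map pvClass)).length ≠ 1 := by
      intro h1
      obtain ⟨y, hy⟩ := List.length_eq_one_iff.mp h1
      have h1' : first = y := by
        have := (PySem.Set.mem_ofList ((h :: t).map pvClass) first).mpr hmemfirst
        rw [hy] at this; simpa using this
      have h2' : x = y := by
        have := (PySem.Set.mem_ofList ((h :: t).map pvClass) x).mpr hxmem
        rw [hy] at this; simpa using this
      exact hxne (h2'.trans h1'.symm)
    simp only [List.map_cons] at hlen
    simp [hscan, hlen]
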